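-- pv_equiv track=rewrite | github.com/guru8880/vehicle-number-plate-detection-using-ML | step3_heuristics.py | _convert_digits
-- ===== SOURCE A (Python) =====
-- ALPHA_TO_DIGIT = {
--     "B": "8",
--     "D": "0",
--     "G": "6",
--     "I": "1",
--     "L": "1",
--     "O": "0",
--     "Q": "0",
--     "S": "5",
--     "Z": "2",
-- }
--
-- def _convert_digits(text: str) -> tuple[str, int]:
--     converted = []
--     conversions = 0
--     for char in text:
--         if char.isdigit():
--             converted.append(char)
--             continue
--         mapped = ALPHA_TO_DIGIT.get(char)
--         if not mapped:
--             return "", 99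
--         converted.append(mapped)
--         conversions += 1
--     return "".join(converted), conversions
-- ===== SOURCE B (Python) =====
-- ALPHA_TO_DIGIT = {
--     "B": "8",
--     "D": "0",
--     "G": "6",
--     "I": "1",
--     "L": "1",
--     "O": "0",
--     "Q": "0",
--     "S": "5",
--     "Z": "2",
-- }
--
-- _TRANS = str.maketrans(ALPHA_TO_DIGIT)
--
-- def _convert_digits(text: str) -> tuple[str, int]:
--     # whole-string translation table, then validate the OUTPUT; count = len - digit count
--     out = text.translate(_TRANS)
--     digits = sum(map(str.isdigit, out))
--     if digits != len(out):
--         return "", 99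
--     return out, len(text) - sum(map(str.isdigit, text))
-- ===== Notes on version B (the rewrite author's own statement) =====
-- stated objective: alternative
-- what changed: B replaces A's single short-circuiting per-character branch loop by a whole-string translation through a precomputed str.maketrans table, validates the translated OUTPUT (all digits) instead of the input, and derives the conversion count arithmetically as len(text) minus the input's digit count.
import Mathlib
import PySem

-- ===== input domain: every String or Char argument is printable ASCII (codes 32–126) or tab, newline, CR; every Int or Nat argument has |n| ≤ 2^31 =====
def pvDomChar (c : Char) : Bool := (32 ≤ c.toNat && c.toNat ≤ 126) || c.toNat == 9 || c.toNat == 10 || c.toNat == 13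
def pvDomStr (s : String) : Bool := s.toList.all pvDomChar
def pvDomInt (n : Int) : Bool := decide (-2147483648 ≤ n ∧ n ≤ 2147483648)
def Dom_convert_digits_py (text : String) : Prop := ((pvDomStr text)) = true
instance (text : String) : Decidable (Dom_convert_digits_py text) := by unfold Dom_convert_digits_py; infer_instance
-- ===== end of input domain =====

-- B translates the whole string through a lookup table first, validates the OUTPUT and derives the count arithmetically (len − #digits); objective: alternative decomposition.

-- ===== PORT A =====
-- module-level ALPHA_TO_DIGIT (characters stand for the 1-char Python strings)
def alphaToDigit : PySem.Dict Char Char :=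
  PySem.Dict.ofList [('B', '8'), ('D', '0'), ('G', '6'), ('I', '1'), ('L', '1'),
                     ('O', '0'), ('Q', '0'), ('S', '5'), ('Z', '2')]

-- A's loop: converted accumulator, conversions counter, early return on unmapped char
def convertDigitsLoop : List Char → List Char → Int → String × Int
  | [], converted, conversions => (String.mk converted, conversions)
  | c :: rest, converted, conversions =>
    if PySem.Chars.isdigit c then
      convertDigitsLoop rest (converted ++ [c]) conversions
    else
      match alphaToDigit.get? c with
      | none => ("", 99)
      | some m => convertDigitsLoop rest (converted ++ [m]) (conversions + 1)

def convert_digits_py (text : String) : String × Int :=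
  convertDigitsLoop text.toList [] 0

-- ===== PORT B =====
-- text.translate(_TRANS): map each char through the table, keeping chars the table does not mention
def convert_digits_py_alt (text : String) : String × Int :=
  let out := text.toList.map (fun c => (alphaToDigit.get? c).getD c)
  let digits : Int := (out.countP PySem.Chars.isdigit : Int)
  if digits ≠ (out.length : Int) then ("", 99)
  else (String.mk out, (text.toList.length : Int) - (text.toList.countP PySem.Chars.isdigit : Int))

-- ===== PRECONDITION & SPEC =====
def Spec_convert_digits_py (text : String) (out : String × Int) : Prop := out = convert_digits_py_alt text
instance (text : String) (out : String × Int) : Decidable (Spec_convert_digits_py text out) := by unfold Spec_convert_digits_py; infer_instance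

-- ===== CLAIM (what is proved, stated in full; the proofs are below) =====
def Claim_equal_convert_digits_py : Prop := ∀ (text : String), Dom_convert_digits_py text → Spec_convert_digits_py text (convert_digits_py text)

-- ===== LEMMAS AND PROOFS =====

theorem alpha_items : alphaToDigit.items = [('B', '8'), ('D', '0'), ('G', '6'), ('I', '1'),
    ('L', '1'), ('O', '0'), ('Q', '0'), ('S', '5'), ('Z', '2')] := by decide

-- a digit character is not a key of the table
theorem get?_alpha_of_isdigit (c : Char) (h : PySem.Chars.isdigit c = true) :
    alphaToDigit.get? c = none := by
  cases hg : alphaToDigit.get? c with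
  | none => rfl
  | some m =>
    have hmem := PySem.Dict.mem_items_of_get?_eq_some _ hg
    rw [alpha_items] at hmem
    simp at hmem
    rcases hmem with ⟨h1,h2⟩|⟨h1,h2⟩|⟨h1,h2⟩|⟨h1,h2⟩|⟨h1,h2⟩|⟨h1,h2⟩|⟨h1,h2⟩|⟨h1,h2⟩|⟨h1,h2⟩ <;>
      subst h1 <;> simp [PySem.Chars.isdigit] at h

-- every value of the table is a digit character
theorem isdigit_alpha_val (c m : Char) (h : alphaToDigit.get? c = some m) :
    PySem.Chars.isdigit m = true := by
  have hmem := PySem.Dict.mem_items_of_get?_eq_some _ h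
  rw [alpha_items] at hmem
  simp at hmem
  rcases hmem with ⟨h1,h2⟩|⟨h1,h2⟩|⟨h1,h2⟩|⟨h1,h2⟩|⟨h1,h2⟩|⟨h1,h2⟩|⟨h1,h2⟩|⟨h1,h2⟩|⟨h1,h2⟩ <;>
    subst h2 <;> decide

-- characterisation of A's loop in B's translate-then-validate terms
theorem convertDigitsLoop_eq (cs : List Char) (acc : List Char) (conv : Int) :
    convertDigitsLoop cs acc conv =
      (if (cs.map (fun c => (alphaToDigit.get? c).getD c)).all PySem.Chars.isdigit then
        (String.mk (acc ++ cs.map (fun c => (alphaToDigit.get? c).getD c)),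
         conv + ((cs.length : Int) - (cs.countP PySem.Chars.isdigit : Int)))
      else ("", 99)) := by
  induction cs generalizing acc conv with
  | nil => simp [convertDigitsLoop]
  | cons c rest ih =>
    by_cases hd : PySem.Chars.isdigit c = true
    · have hn := get?_alpha_of_isdigit c hd
      rw [convertDigitsLoop, if_pos hd, ih]
      simp only [List.map_cons, hn, Option.getD_none, List.all_cons, hd, Bool.true_and,
        List.countP_cons, List.length_cons]
      split_ifs with hall
      · simp only [List.append_assoc, List.singleton_append, Prod.mk.injEq, true_and]
        push_cast
        ring
      · rfl
    · rw [convertDigitsLoop, if_neg hd]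
      cases hm : alphaToDigit.get? c with
      | none =>
        have hfd : PySem.Chars.isdigit ((alphaToDigit.get? c).getD c) = false := by
          rw [hm]; simpa using (Bool.eq_false_iff.mpr hd)
        simp [List.all_cons, hfd]
      | some m =>
        have hvm := isdigit_alpha_val c m hm
        simp only [ih]
        simp only [List.map_cons, hm, Option.getD_some, List.all_cons, hvm, Bool.true_and,
          List.countP_cons, List.length_cons]
        split_ifs with hall
        · simp only [List.append_assoc, List.singleton_append, Prod.mk.injEq, true_and]
          push_cast
          ring
        · rfl

-- B's validity test (digit count = length) is the all-digits test
theorem countP_ne_length_iff (l : List Char) :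
    (((l.countP PySem.Chars.isdigit : Int)) ≠ (l.length : Int)) ↔
      ¬ (l.all PySem.Chars.isdigit = true) := by
  constructor
  · intro h hall
    exact h (by exact_mod_cast
      (List.countP_eq_length.mpr (by simpa [List.all_eq_true] using hall)))
  · intro h hcnt
    apply h
    rw [List.all_eq_true]
    intro a ha
    have hn : l.countP PySem.Chars.isdigit = l.length := by exact_mod_cast hcnt
    exact List.countP_eq_length.mp hn a ha

-- ===== VERDICT (by name: the statement is the Claim_ definition above) =====
theorem convert_digits_py_spec : Claim_equal_convert_digits_py := by
  intro text _
  unfold Spec_convert_digits_py convert_digits_py convert_digits_py_alt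
  rw [convertDigitsLoop_eq]
  simp only []
  by_cases hall : (text.toList.map (fun c => (alphaToDigit.get? c).getD c)).all PySem.Chars.isdigit = true
  · rw [if_pos hall, if_neg (by rw [countP_ne_length_iff]; simp [hall])]
    simp only [List.nil_append]
    ring_nf
  · rw [if_neg hall, if_pos (by rw [countP_ne_length_iff]; exact hall)]
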